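-- pv_equiv track=rewrite | github.com/4n4nk3/skribbl-io-guesser | guesser.py | build_my_regexp
-- ===== SOURCE A (Python) =====
-- def build_my_regexp(word: str) -> str:
--     """Build regexp based on displayed characters tips."""
--
--     built_regexp = r'\b'
--     for letter in word:
--         if letter == '_':
--             built_regexp += r'\w'
--         else:
--             built_regexp += letter
--     built_regexp += r'\b'
--     return built_regexp
-- ===== SOURCE B (Python) =====
-- def build_my_regexp(word: str) -> str:
--     """Build regexp based on displayed characters tips."""
--     return r'\b' + r'\w'.join(word.split('_')) + r'\b'
-- ===== Notes on version B (the rewrite author's own statement) =====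
-- stated objective: faster
-- what changed: Instead of scanning character by character with a string accumulator and branching on each underscore, B splits the word into the list of its underscore-separated segments and joins that list with the word-character metaclass between the two boundary anchors.
import Mathlib
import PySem

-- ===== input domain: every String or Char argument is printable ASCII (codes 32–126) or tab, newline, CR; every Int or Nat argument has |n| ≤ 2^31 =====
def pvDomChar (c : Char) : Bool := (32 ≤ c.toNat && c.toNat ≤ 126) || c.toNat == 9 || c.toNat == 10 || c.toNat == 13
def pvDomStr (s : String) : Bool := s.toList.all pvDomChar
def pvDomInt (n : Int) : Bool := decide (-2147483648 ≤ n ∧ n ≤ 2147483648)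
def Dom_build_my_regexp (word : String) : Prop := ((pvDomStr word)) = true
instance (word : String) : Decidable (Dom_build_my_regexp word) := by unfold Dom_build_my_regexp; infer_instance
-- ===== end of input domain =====

-- B replaces A's per-character accumulator loop by split-on-underscore + join with the word metaclass; same output, measured faster at large sizes.

-- ===== PORT A =====
def build_my_regexp (word : String) : String :=
  let built_regexp := "\\b"
  let built_regexp := word.toList.foldl
    (fun acc letter => if letter = '_' then acc ++ "\\w" else acc ++ letter.toString)
    built_regexp
  built_regexp ++ "\\b"

-- ===== PORT B =====
def build_my_regexp_alt (word : String) : String :=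
  "\\b" ++ PySem.Str.join "\\w" ((PySem.Str.split? word "_").getD []) ++ "\\b"

-- ===== PRECONDITION & SPEC =====
def Spec_build_my_regexp (word : String) (out : String) : Prop := out = build_my_regexp_alt word
instance (word : String) (out : String) : Decidable (Spec_build_my_regexp word out) := by unfold Spec_build_my_regexp; infer_instance

-- ===== CLAIM (what is proved, stated in full; the proofs are below) =====
def Claim_equal_build_my_regexp : Prop := ∀ (word : String), Dom_build_my_regexp word → Spec_build_my_regexp word (build_my_regexp word)

-- ===== LEMMAS AND PROOFS =====

/-- Substituting each '_' by `nw`, character by character (the common reference form). -/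
def repUnderscore (nw : List Char) (l : List Char) : List Char :=
  l.flatMap (fun c => if c = '_' then nw else [c])

/-- Apply `f` to the head segment only. -/
def mapHead (f : List Char → List Char) : List (List Char) → List (List Char)
  | [] => []
  | h :: r => f h :: r

/-- Reference split on '_' (keeps empty segments, like Python's str.split('_')). -/
def splitU : List Char → List (List Char)
  | [] => [[]]
  | c :: t => if c = '_' then [] :: splitU t else mapHead (fun h => c :: h) (splitU t)

theorem splitU_ne_nil (l : List Char) : splitU l ≠ [] := by
  induction l with
  | nil => simp [splitU]
  | cons c t ih =>
    by_cases hc : c = '_'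
    · simp [splitU, hc]
    · cases h : splitU t with
      | nil => exact absurd h ih
      | cons a r => simp [splitU, hc, h, mapHead]

theorem go_spec (l : List Char) : ∀ (cur : List Char) (acc : List (List Char)) (fuel : Nat),
    l.length ≤ fuel →
    PySem.Chars.splitOn.go ['_'] fuel l cur acc
      = acc.reverse ++ mapHead (fun h => cur.reverse ++ h) (splitU l) := by
  induction l with
  | nil =>
    intro cur acc fuel _
    cases fuel <;> simp [PySem.Chars.splitOn.go, splitU, mapHead]
  | cons c t ih =>
    intro cur acc fuel hle
    cases fuel with
    | zero => simp at hle
    | succ n =>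
      by_cases hc : c = '_'
      · subst hc
        have hp : List.isPrefixOf ['_'] ('_' :: t) = true := by simp [List.isPrefixOf]
        simp only [PySem.Chars.splitOn.go, hp, if_pos]
        rw [show List.drop (List.length ['_']) ('_' :: t) = t from rfl]
        rw [ih [] (cur.reverse :: acc) n (by simpa using hle)]
        cases h : splitU t with
        | nil => exact absurd h (splitU_ne_nil t)
        | cons a r => simp [splitU, mapHead, h]
      · have hp : List.isPrefixOf ['_'] (c :: t) = false := by
          simp only [List.isPrefixOf, Bool.and_true, beq_eq_false_iff_ne]
          exact fun h => hc h.symm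
        simp only [PySem.Chars.splitOn.go, hp, Bool.false_eq_true, if_false]
        rw [ih (c :: cur) acc n (by simpa using hle)]
        cases h : splitU t with
        | nil => exact absurd h (splitU_ne_nil t)
        | cons a r => simp [splitU, mapHead, hc, h]

theorem splitOn_eq_splitU (l : List Char) :
    PySem.Chars.splitOn l ['_'] = splitU l := by
  have h := go_spec l [] [] (l.length + 1) (by omega)
  rw [PySem.Chars.splitOn, h]
  cases hs : splitU l with
  | nil => exact absurd hs (splitU_ne_nil l)
  | cons a r => simp [mapHead]

theorem join_splitU (nw : List Char) (l : List Char) :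
    PySem.Chars.join nw (splitU l) = repUnderscore nw l := by
  induction l with
  | nil => simp [splitU, PySem.Chars.join, List.intercalate, repUnderscore]
  | cons c t ih =>
    cases h : splitU t with
    | nil => exact absurd h (splitU_ne_nil t)
    | cons a r =>
      by_cases hc : c = '_'
      · have hj : PySem.Chars.join nw ([] :: a :: r) = nw ++ PySem.Chars.join nw (a :: r) := by
          simp [PySem.Chars.join, List.intercalate]
        have ih' : PySem.Chars.join nw (a :: r) = repUnderscore nw t := by rw [← h]; exact ih
        simp only [splitU, hc, if_pos, h]
        rw [hj, ih']
        simp [repUnderscore]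
      · have : PySem.Chars.join nw ((c :: a) :: r) = c :: PySem.Chars.join nw (a :: r) := by
          cases r <;> simp [PySem.Chars.join, List.intercalate]
        simp only [splitU, hc, h, mapHead]
        rw [if_neg (by exact fun hf => hf)]
        rw [this]
        have ih' : PySem.Chars.join nw (a :: r) = repUnderscore nw t := by rw [← h]; exact ih
        rw [ih']
        simp [repUnderscore, hc]

theorem foldl_toList (l : List Char) : ∀ (init : String),
    (l.foldl (fun acc letter => if letter = '_' then acc ++ "\\w" else acc ++ letter.toString) init).toList
      = init.toList ++ repUnderscore ('\\' :: ['w']) l := by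
  induction l with
  | nil => intro init; simp [repUnderscore]
  | cons c t ih =>
    intro init
    rw [List.foldl_cons]
    by_cases hc : c = '_'
    · rw [if_pos hc, ih]
      simp [hc, repUnderscore]
    · rw [if_neg hc, ih]
      simp [repUnderscore, hc, Char.toString]

-- ===== VERDICT (by name: the statement is the Claim_ definition above) =====
theorem build_my_regexp_spec : Claim_equal_build_my_regexp := by
  intro word _
  unfold Spec_build_my_regexp build_my_regexp build_my_regexp_alt
  apply String.toList_inj.mp
  rw [String.toList_append, foldl_toList]
  simp only [PySem.Str.split?, PySem.Chars.split?, String.toList_append, PySem.Str.toList_join]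
  rw [show ("_" : String).toList = ['_'] from rfl, splitOn_eq_splitU]
  simp only [List.isEmpty_cons, Bool.false_eq_true, if_false, Option.map_some, Option.getD_some,
    List.map_map]
  have hid : (String.toList ∘ String.ofList) = id := by funext x; simp
  rw [hid, List.map_id, show ("\\w" : String).toList = ['\\', 'w'] from rfl, join_splitU]
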